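-- pv_equiv track=rewrite | github.com/MatiasMerl0/TDA-clementina | TP2/juego_cartas.py | obtener_optimo
-- ===== SOURCE A (Python) =====
-- def matriz_vacia(filas, cols):
--     m = []
--     for i in range(filas):
--         m.append([])
--         for j in range(cols):
--             m[i].append(None)
--     return m
--
-- def obtener_optimo(cartas):
--     '''
--     Devuelve una matriz donde, en la posicion m[i][j] indica si, para
--     una instancia del problema donde el extremo izquierdo es la carta en la
--     posicion i y el derecho la que esta en la posicion j (i <= j), indica True
--     si conviene elegir la de la izquierda, o False si la de la derecha.
--     Para los casos de 1 carta o donde sea lo mismo, elegimos izquierda por convencion.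
--     En las posiciones tales que j < i, guardamos None ya que no seran tenidas en cuenta
--     '''
--     n = len(cartas)
--     opt = matriz_vacia(n, n)
--     for i in range(n): opt[i][i] = True
--
--     #Recorremos por diagonales ascendentemente, son n iteraciones. En el peor caso adentro se realizan n operaciones
--     # La complejidad total de estas iteraciones es O(n^2)
--     for k in range(1, n):
--         i = 0
--         j = k
--         while j < n: #Cada recorrido diagonal finaliza cuando j llega al final
--             puntaje_izq = cartas[i]
--             puntaje_izq -= cartas[i+1] if opt[i+1][j] else cartas[j]
--             puntaje_der = cartas[j]
--             puntaje_der -= cartas[i] if opt[i][j-1] else cartas[j-1]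
--             if puntaje_izq >= puntaje_der: opt[i][j] = True
--             else: opt[i][j] = False
--             i += 1
--             j += 1
--     return opt
-- ===== SOURCE B (Python) =====
-- def obtener_optimo(cartas):
--     # Row-wise fill from the bottom row up: row i depends only on row i+1 and the
--     # cell just written in row i, so no pre-allocated matrix or diagonal walk is needed.
--     n = len(cartas)
--     filas = []
--     siguiente = []
--     for i in range(n - 1, -1, -1):
--         fila = [None] * i + [True]
--         prev = True
--         for j in range(i + 1, n):
--             izq = cartas[i] - (cartas[i + 1] if siguiente[j] else cartas[j])
--             der = cartas[j] - (cartas[i] if prev else cartas[j - 1])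
--             prev = izq >= der
--             fila.append(prev)
--         filas.append(fila)
--         siguiente = fila
--     filas.reverse()
--     return filas
-- ===== Notes on version B (the rewrite author's own statement) =====
-- stated objective: alternative
-- what changed: Replaces A's pre-allocated n×n None-matrix mutated along ascending diagonals (plus the matriz_vacia helper) with a row-wise build from the bottom row up, where each row is constructed left-to-right from the previously built row and the cell just written, then the row list is reversed.
import Mathlib
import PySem

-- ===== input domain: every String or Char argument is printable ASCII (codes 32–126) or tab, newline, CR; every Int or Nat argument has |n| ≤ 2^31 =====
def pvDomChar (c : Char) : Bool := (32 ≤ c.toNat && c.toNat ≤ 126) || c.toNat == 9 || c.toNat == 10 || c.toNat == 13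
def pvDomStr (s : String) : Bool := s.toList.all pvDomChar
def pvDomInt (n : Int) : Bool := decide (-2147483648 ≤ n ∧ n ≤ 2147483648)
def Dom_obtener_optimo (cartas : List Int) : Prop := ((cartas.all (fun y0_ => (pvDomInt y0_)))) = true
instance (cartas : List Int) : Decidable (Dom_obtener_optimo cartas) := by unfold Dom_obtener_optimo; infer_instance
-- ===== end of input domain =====

-- B fills the matrix row by row from the bottom row up instead of A's diagonal-by-diagonal
-- sweep over a pre-allocated mutable matrix; same values, different decomposition (objective: alternative).

-- ===== PORT A =====
-- nested-list helpers for A's in-place matrix reads/writes (indices are in range in A)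
def get2 (m : List (List (Option Bool))) (i j : Nat) : Option Bool :=
  (m.getD i []).getD j none

def set2 (m : List (List (Option Bool))) (i j : Nat) (v : Option Bool) : List (List (Option Bool)) :=
  m.set i ((m.getD i []).set j v)

def matriz_vacia (filas cols : Nat) : List (List (Option Bool)) :=
  (List.range filas).foldl
    (fun m _ => m ++ [(List.range cols).foldl (fun r _ => r ++ [(none : Option Bool)]) []]) []

-- the `while j < n` loop of A; fuel bounds the iteration count, the `j < n` test is A's own
def whileA (c : List Int) (n : Nat) : Nat → List (List (Option Bool)) → Nat → Nat → List (List (Option Bool))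
  | 0, m, _, _ => m
  | f+1, m, i, j =>
    if j < n then
      let izq := c.getD i 0 - (if (get2 m (i+1) j).getD false then c.getD (i+1) 0 else c.getD j 0)
      let der := c.getD j 0 - (if (get2 m i (j-1)).getD false then c.getD i 0 else c.getD (j-1) 0)
      whileA c n f (set2 m i j (some (decide (der ≤ izq)))) (i+1) (j+1)
    else m

def obtener_optimo (cartas : List Int) : List (List (Option Bool)) :=
  let n := cartas.length
  let opt := matriz_vacia n n
  let opt := (List.range n).foldl (fun m i => set2 m i i (some true)) opt
  (List.range' 1 (n-1)).foldl (fun m k => whileA cartas n n m 0 k) opt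

-- ===== PORT B =====
-- inner `for j in range(i+1, n)` loop of Source B: fuel = n-(i+1) iterations, carrying prev
def cellsB (c : List Int) (i : Nat) (sig : List (Option Bool)) : Nat → Nat → Bool → List (Option Bool)
  | 0, _, _ => []
  | f+1, j, prev =>
    let izq := c.getD i 0 - (if (sig.getD j none).getD false then c.getD (i+1) 0 else c.getD j 0)
    let der := c.getD j 0 - (if prev then c.getD i 0 else c.getD (j-1) 0)
    let cur := decide (der ≤ izq)
    some cur :: cellsB c i sig f (j+1) cur

def filaB (c : List Int) (n i : Nat) (sig : List (Option Bool)) : List (Option Bool) :=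
  List.replicate i none ++ some true :: cellsB c i sig (n - (i+1)) (i+1) true

-- outer `for i in range(n-1, -1, -1)` loop: t iterations done, state (filas, siguiente)
def loopB (c : List Int) (n : Nat) : Nat → (List (List (Option Bool)) × List (Option Bool))
  | 0 => ([], [])
  | t+1 =>
    let st := loopB c n t
    let fila := filaB c n (n - 1 - t) st.2
    (st.1 ++ [fila], fila)

def obtener_optimo_alt (cartas : List Int) : List (List (Option Bool)) :=
  let n := cartas.length
  (loopB cartas n n).1.reverse

-- ===== PRECONDITION & SPEC =====
def Spec_obtener_optimo (cartas : List Int) (out : List (List (Option Bool))) : Prop := out = obtener_optimo_alt cartas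
instance (cartas : List Int) (out : List (List (Option Bool))) : Decidable (Spec_obtener_optimo cartas out) := by unfold Spec_obtener_optimo; infer_instance

-- ===== CLAIM (what is proved, stated in full; the proofs are below) =====
def Claim_equal_obtener_optimo : Prop := ∀ (cartas : List Int), Dom_obtener_optimo cartas → Spec_obtener_optimo cartas (obtener_optimo cartas)

-- ===== LEMMAS AND PROOFS =====

-- the recurrence both programs compute, as a pure function of (i,j)
def gOpt (c : List Int) (i j : Nat) : Bool :=
  if j ≤ i then true
  else
    let a := gOpt c (i+1) j
    let b := gOpt c i (j-1)
    decide (c.getD j 0 - (if b then c.getD i 0 else c.getD (j-1) 0)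
            ≤ c.getD i 0 - (if a then c.getD (i+1) 0 else c.getD j 0))
termination_by j - i
decreasing_by all_goals omega

def Trow (c : List Int) (n i : Nat) : List (Option Bool) :=
  (List.range n).map (fun j => if i ≤ j then some (gOpt c i j) else none)

def Tmat (c : List Int) (n : Nat) : List (List (Option Bool)) :=
  (List.range n).map (Trow c n)

-- A's matrix after diagonals 1..k-? : cells with j-i<k filled, plus diagonal k up to row s
def Qmat (c : List Int) (n k s : Nat) : List (List (Option Bool)) :=
  (List.range n).map fun i => (List.range n).map fun j =>
    if i ≤ j ∧ (j - i < k ∨ (j - i = k ∧ i < s)) then some (gOpt c i j) else none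

-- diagonal-initialisation intermediate state
def Dmat (n s : Nat) : List (List (Option Bool)) :=
  (List.range n).map fun i => (List.range n).map fun j =>
    if i = j ∧ i < s then some true else none

theorem gOpt_diag (c : List Int) (i : Nat) : gOpt c i i = true := by
  rw [gOpt]; simp

theorem gOpt_step (c : List Int) (i j : Nat) (h : i < j) :
    gOpt c i j = decide (c.getD j 0 - (if gOpt c i (j-1) then c.getD i 0 else c.getD (j-1) 0)
            ≤ c.getD i 0 - (if gOpt c (i+1) j then c.getD (i+1) 0 else c.getD j 0)) := by
  rw [gOpt]; simp [Nat.not_le.mpr h]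

theorem getD_map_range {α : Type} (F : Nat → α) (d : α) (a n : Nat) (h : a < n) :
    ((List.range n).map F).getD a d = F a := by
  simp [List.getD_eq_getElem?_getD, h]

theorem get2_Qmat (c : List Int) (n k s a b : Nat) (ha : a < n) (hb : b < n) :
    get2 (Qmat c n k s) a b =
      if a ≤ b ∧ (b - a < k ∨ (b - a = k ∧ a < s)) then some (gOpt c a b) else none := by
  unfold get2 Qmat
  rw [getD_map_range _ _ _ _ ha, getD_map_range _ _ _ _ hb]

theorem set2_map {n : Nat} (F G : Nat → Nat → Option Bool) (a b : Nat) (v : Option Bool)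
    (ha : a < n) (_hb : b < n)
    (h1 : ∀ i, i < n → ∀ j, j < n → ¬(i = a ∧ j = b) → F i j = G i j) (h2 : G a b = v) :
    set2 ((List.range n).map (fun i => (List.range n).map (F i))) a b v
      = (List.range n).map (fun i => (List.range n).map (G i)) := by
  unfold set2
  rw [getD_map_range _ _ _ _ ha]
  apply List.ext_getElem
  · simp
  · intro i hlen _
    simp only [List.length_set, List.length_map, List.length_range] at hlen
    simp only [List.getElem_set, List.getElem_map, List.getElem_range]
    by_cases hia : a = i
    · subst hia
      rw [if_pos rfl]
      apply List.ext_getElem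
      · simp
      · intro j hlen2 _
        simp only [List.length_set, List.length_map, List.length_range] at hlen2
        simp only [List.getElem_set, List.getElem_map, List.getElem_range]
        by_cases hjb : b = j
        · subst hjb
          rw [if_pos rfl, ← h2]
        · rw [if_neg hjb]
          exact h1 a ha j hlen2 (by tauto)
    · rw [if_neg hia]
      apply List.map_congr_left
      intro j hj
      simp only [List.mem_range] at hj
      exact h1 i hlen j hj (by tauto)

theorem whileA_inv (c : List Int) (n k : Nat) (hk : 1 ≤ k) :
    ∀ f s, n ≤ f + (k + s) →
      whileA c n f (Qmat c n k s) s (k+s) = Qmat c n k (s + (n - (k+s))) := by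
  intro f
  induction f with
  | zero =>
    intro s hs
    have h0 : s + (n - (k+s)) = s := by omega
    rw [whileA, h0]
  | succ f ih =>
    intro s hs
    rw [whileA]
    by_cases hj : k + s < n
    · simp only [if_pos hj]
      have e1 : get2 (Qmat c n k s) (s+1) (k+s) = some (gOpt c (s+1) (k+s)) := by
        rw [get2_Qmat c n k s (s+1) (k+s) (by omega) (by omega), if_pos (by omega)]
      have e2 : get2 (Qmat c n k s) s (k+s-1) = some (gOpt c s (k+s-1)) := by
        rw [get2_Qmat c n k s s (k+s-1) (by omega) (by omega), if_pos (by omega)]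
      simp only [e1, e2, Option.getD_some]
      rw [← gOpt_step c s (k+s) (by omega)]
      have hset : set2 (Qmat c n k s) s (k+s) (some (gOpt c s (k+s))) = Qmat c n k (s+1) := by
        unfold Qmat
        apply set2_map _ _ s (k+s) _ (by omega) (by omega)
        · intro i hi j hjn hne
          have hiff : (i ≤ j ∧ (j - i < k ∨ (j - i = k ∧ i < s))) ↔
              (i ≤ j ∧ (j - i < k ∨ (j - i = k ∧ i < s+1))) := by omega
          rw [if_congr hiff rfl rfl]
        · rw [if_pos (show s ≤ k+s ∧ ((k+s) - s < k ∨ ((k+s) - s = k ∧ s < s+1)) by omega)]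
      rw [hset]
      have := ih (s+1) (by omega)
      rw [show k+s+1 = k+(s+1) from by omega, this]
      congr 1
      omega
    · simp only [if_neg hj]
      have h0 : s + (n - (k+s)) = s := by omega
      rw [h0]

theorem Qmat_roll (c : List Int) (n k : Nat) :
    Qmat c n k (n - k) = Qmat c n (k+1) 0 := by
  unfold Qmat
  apply List.map_congr_left
  intro i hi
  apply List.map_congr_left
  intro j hj
  simp only [List.mem_range] at hi hj
  have hiff : (i ≤ j ∧ (j - i < k ∨ (j - i = k ∧ i < n - k))) ↔
      (i ≤ j ∧ (j - i < k+1 ∨ (j - i = k+1 ∧ i < 0))) := by omega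
  rw [if_congr hiff rfl rfl]

theorem foldl_append_const {α β : Type} (l : List α) (b : β) :
    ∀ init : List β, l.foldl (fun r _ => r ++ [b]) init = init ++ List.replicate l.length b := by
  induction l with
  | nil => simp
  | cons x xs ih =>
    intro init
    simp only [List.foldl_cons, ih, List.length_cons, List.replicate_succ]
    simp

theorem matriz_vacia_eq (n : Nat) : matriz_vacia n n = Dmat n 0 := by
  unfold matriz_vacia Dmat
  rw [foldl_append_const, foldl_append_const]
  simp [List.map_const']

theorem diag_fold (n : Nat) : ∀ t, t ≤ n →
    (List.range t).foldl (fun m i => set2 m i i (some true)) (Dmat n 0) = Dmat n t := by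
  intro t
  induction t with
  | zero => simp
  | succ t ih =>
    intro ht
    rw [List.range_succ, List.foldl_append, ih (by omega)]
    simp only [List.foldl_cons, List.foldl_nil]
    unfold Dmat
    apply set2_map _ _ t t _ (by omega) (by omega)
    · intro i hi j hj hne
      have hiff : (i = j ∧ i < t) ↔ (i = j ∧ i < t+1) := by omega
      rw [if_congr hiff rfl rfl]
    · rw [if_pos (show t = t ∧ t < t+1 by omega)]

theorem Dmat_eq_Qmat (c : List Int) (n : Nat) : Dmat n n = Qmat c n 1 0 := by
  unfold Dmat Qmat
  apply List.map_congr_left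
  intro i hi
  apply List.map_congr_left
  intro j hj
  simp only [List.mem_range] at hi hj
  by_cases h : i = j
  · subst h
    rw [if_pos (by omega), if_pos (by omega), gOpt_diag]
  · rw [if_neg (by tauto), if_neg (by omega)]

theorem A_fold (c : List Int) (n : Nat) : ∀ t, t ≤ n - 1 →
    (List.range' 1 t).foldl (fun m k => whileA c n n m 0 k) (Qmat c n 1 0) = Qmat c n (t+1) 0 := by
  intro t
  induction t with
  | zero => simp
  | succ t ih =>
    intro ht
    rw [show t + 1 = t + 1 from rfl, List.range'_concat, List.foldl_append, ih (by omega)]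
    simp only [List.foldl_cons, List.foldl_nil]
    have h1 : (1 : Nat) + 1 * t = t + 1 := by omega
    rw [h1]
    have hw := whileA_inv c n (t+1) (by omega) n 0 (by omega)
    simp only [Nat.add_zero, Nat.zero_add] at hw
    rw [hw]
    have h2 : n - (t+1) = n - (t+1) := rfl
    rw [Qmat_roll]

theorem Qmat_eq_Tmat (c : List Int) (n : Nat) : Qmat c n n 0 = Tmat c n := by
  unfold Qmat Tmat Trow
  apply List.map_congr_left
  intro i hi
  apply List.map_congr_left
  intro j hj
  simp only [List.mem_range] at hi hj
  have hiff : (i ≤ j ∧ (j - i < n ∨ (j - i = n ∧ i < 0))) ↔ i ≤ j := by omega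
  rw [if_congr hiff rfl rfl]

theorem A_eq_T (c : List Int) : obtener_optimo c = Tmat c c.length := by
  show (List.range' 1 (c.length - 1)).foldl (fun m k => whileA c c.length c.length m 0 k)
      ((List.range c.length).foldl (fun m i => set2 m i i (some true))
        (matriz_vacia c.length c.length)) = Tmat c c.length
  by_cases hn : c.length = 0
  · simp [hn, matriz_vacia, Tmat]
  · rw [matriz_vacia_eq, diag_fold c.length c.length le_rfl, Dmat_eq_Qmat,
        A_fold c c.length (c.length - 1) le_rfl,
        show c.length - 1 + 1 = c.length from by omega, Qmat_eq_Tmat]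

theorem cellsB_eq (c : List Int) (n i : Nat) (sig : List (Option Bool))
    (hsig : ∀ k, i + 1 ≤ k → k < n → sig.getD k none = some (gOpt c (i+1) k)) :
    ∀ f j prev, j + f = n → i + 1 ≤ j → prev = gOpt c i (j-1) →
      cellsB c i sig f j prev = (List.range' j f).map (fun k => some (gOpt c i k)) := by
  intro f
  induction f with
  | zero => intro j prev _ _ _; simp [cellsB]
  | succ f ih =>
    intro j prev hjf hij hprev
    have hj : j < n := by omega
    simp only [cellsB]
    simp only [hsig j hij hj, Option.getD_some, hprev]
    rw [← gOpt_step c i j (by omega), List.range'_succ, List.map_cons]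
    congr 1
    exact ih (j+1) _ (by omega) (by omega) (by simp)

theorem Trow_split (c : List Int) (n i : Nat) (hi : i < n) :
    Trow c n i = List.replicate i none ++ some true ::
      (List.range' (i+1) (n - (i+1))).map (fun k => some (gOpt c i k)) := by
  unfold Trow
  have hsplit : List.range n = List.range' 0 i ++ List.range' i (n - i) := by
    have h := @List.range'_append 0 i (n - i) 1
    simp only [Nat.zero_add, Nat.one_mul] at h
    rw [show i + (n - i) = n from by omega] at h
    rw [List.range_eq_range']
    exact h.symm
  rw [hsplit, List.map_append]
  congr 1
  · rw [List.map_congr_left (g := fun _ => (none : Option Bool))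
        (by intro j hj; simp only [List.mem_range'_1] at hj; rw [if_neg]; omega)]
    simp [List.map_const']
  · rw [show n - i = (n - (i+1)) + 1 from by omega, List.range'_succ, List.map_cons]
    congr 1
    · rw [if_pos le_rfl, gOpt_diag]
    · apply List.map_congr_left
      intro j hj
      simp only [List.mem_range'_1] at hj
      rw [if_pos (by omega)]

theorem filaB_eq (c : List Int) (n i : Nat) (sig : List (Option Bool)) (hi : i < n)
    (hsig : ∀ k, i + 1 ≤ k → k < n → sig.getD k none = some (gOpt c (i+1) k)) :
    filaB c n i sig = Trow c n i := by
  unfold filaB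
  rw [cellsB_eq c n i sig hsig (n - (i+1)) (i+1) true (by omega) le_rfl
      (by simp [gOpt_diag]), Trow_split c n i hi]

theorem Trow_getD (c : List Int) (n i k : Nat) (hk : k < n) :
    (Trow c n i).getD k none = if i ≤ k then some (gOpt c i k) else none := by
  unfold Trow; rw [getD_map_range _ _ _ _ hk]

theorem loopB_inv (c : List Int) (n : Nat) : ∀ t, t ≤ n →
    (loopB c n t).1 = ((List.range' (n-t) t).map (Trow c n)).reverse ∧
    (∀ k, n - t ≤ k → k < n → (loopB c n t).2.getD k none = some (gOpt c (n-t) k)) := by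
  intro t
  induction t with
  | zero =>
    intro _
    refine ⟨by simp [loopB], ?_⟩
    intro k hk1 hk2
    omega
  | succ t ih =>
    intro ht
    obtain ⟨ih1, ih2⟩ := ih (by omega)
    have hfil : filaB c n (n - 1 - t) (loopB c n t).2 = Trow c n (n - (t+1)) := by
      rw [show n - 1 - t = n - (t+1) from by omega]
      apply filaB_eq _ _ _ _ (by omega)
      intro k hk1 hk2
      rw [show n - (t+1) + 1 = n - t from by omega]
      exact ih2 k (by omega) hk2
    constructor
    · simp only [loopB]
      rw [ih1, hfil]
      have hr : List.range' (n - (t+1)) (t+1) = (n - (t+1)) :: List.range' (n - t) t := by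
        rw [List.range'_succ, show n - (t+1) + 1 = n - t from by omega]
      rw [hr, List.map_cons, List.reverse_cons]
    · intro k hk1 hk2
      simp only [loopB]
      rw [hfil, Trow_getD c n _ k hk2, if_pos (by omega)]

theorem B_eq_T (c : List Int) : obtener_optimo_alt c = Tmat c c.length := by
  show (loopB c c.length c.length).1.reverse = Tmat c c.length
  obtain ⟨h1, _⟩ := loopB_inv c c.length c.length le_rfl
  rw [h1]
  simp only [Nat.sub_self, List.reverse_reverse]
  rw [← List.range_eq_range']
  rfl

-- ===== VERDICT (by name: the statement is the Claim_ definition above) =====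
theorem obtener_optimo_spec : Claim_equal_obtener_optimo := by
  intro c _
  unfold Spec_obtener_optimo
  rw [A_eq_T, B_eq_T]
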